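-- pv_equiv track=rewrite | github.com/arianasatryan/saving | style_analysis/information.py | get_starts_of_paragraphs
-- ===== SOURCE A (Python) =====
-- def get_starts_of_paragraphs(paragraphs):
--     start_of_paragraph = {}
--     i = 1
--     length = 0
--     for item in paragraphs:
--         start_of_paragraph[i] = length
--         i += 1
--         length += (len(item))
--     return start_of_paragraph
-- ===== SOURCE B (Python) =====
-- def get_starts_of_paragraphs(paragraphs):
--     # Walk the paragraphs right-to-left: start from the total length and
--     # subtract each paragraph's length to get its start offset, collecting
--     # the (index, start) pairs back-to-front, then reverse to restore order.
--     pairs = []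
--     position = sum(len(p) for p in paragraphs)
--     for i in range(len(paragraphs), 0, -1):
--         position -= len(paragraphs[i - 1])
--         pairs.append((i, position))
--     return dict(reversed(pairs))
-- ===== Notes on version B (the rewrite author's own statement) =====
-- stated objective: alternative
-- what changed: Instead of A's single left-to-right pass accumulating the running length into the dict, B computes the total length once, then walks the paragraphs right-to-left subtracting each length to obtain the start offsets, building the (index, start) pairs back-to-front and reversing them into the dict.
import Mathlib
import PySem

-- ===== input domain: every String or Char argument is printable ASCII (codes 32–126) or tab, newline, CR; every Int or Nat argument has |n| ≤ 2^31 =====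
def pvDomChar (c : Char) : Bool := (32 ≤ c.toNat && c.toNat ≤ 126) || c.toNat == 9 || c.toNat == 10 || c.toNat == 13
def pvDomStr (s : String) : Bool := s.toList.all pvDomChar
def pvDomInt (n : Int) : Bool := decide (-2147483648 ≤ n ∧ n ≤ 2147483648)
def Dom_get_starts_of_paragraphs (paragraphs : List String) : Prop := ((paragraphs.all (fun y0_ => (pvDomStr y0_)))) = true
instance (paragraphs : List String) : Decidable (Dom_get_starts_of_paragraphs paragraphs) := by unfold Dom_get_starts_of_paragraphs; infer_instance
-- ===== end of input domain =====

-- B replaces A's single left-to-right accumulating pass with a right-to-left walk: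
-- total length first, then subtract each paragraph's length, building the pairs
-- back-to-front and reversing them into the dict (alternative decomposition).


-- ===== PORT A =====
-- literal transliteration: a dict, a counter i starting at 1 and a running length,
-- updated by one fold over paragraphs; the dict (association list) is returned.
def get_starts_of_paragraphs (paragraphs : List String) : List (Int × Int) :=
  (paragraphs.foldl
    (fun (st : PySem.Dict Int Int × Int × Int) item =>
      let (d, i, length) := st
      (d.insert i length, i + 1, length + PySem.Str.len item))
    (PySem.Dict.empty, 1, 0)).1.items

-- ===== PORT B =====
-- total = sum of lengths; countdown loop i = n..1 subtracting lengths
-- (paragraphs[i-1] is always in range, so .getD "" is never the default);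
-- then dict(reversed(pairs)) as a fold of inserts.
def get_starts_of_paragraphs_alt (paragraphs : List String) : List (Int × Int) :=
  let total := paragraphs.foldl (fun a p => a + PySem.Str.len p) 0
  let st := (PySem.List.pyRange (paragraphs.length : Int) 0 (-1)).foldl
    (fun (st : List (Int × Int) × Int) i =>
      let pos := st.2 - PySem.Str.len ((PySem.List.pyGet? paragraphs (i - 1)).getD "")
      (st.1 ++ [(i, pos)], pos))
    ([], total)
  (st.1.reverse.foldl (fun (d : PySem.Dict Int Int) p => d.insert p.1 p.2) PySem.Dict.empty).items

-- ===== PRECONDITION & SPEC =====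
def Spec_get_starts_of_paragraphs (paragraphs : List String) (out : List (Int × Int)) : Prop := out = get_starts_of_paragraphs_alt paragraphs
instance (paragraphs : List String) (out : List (Int × Int)) : Decidable (Spec_get_starts_of_paragraphs paragraphs out) := by unfold Spec_get_starts_of_paragraphs; infer_instance

-- ===== CLAIM =====
def Claim_equal_get_starts_of_paragraphs : Prop := ∀ (paragraphs : List String), Dom_get_starts_of_paragraphs paragraphs → Spec_get_starts_of_paragraphs paragraphs (get_starts_of_paragraphs paragraphs)

-- ===== LEMMAS AND PROOFS =====

-- exclusive prefix sum of the paragraph lengths: start offset of paragraph j+1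
def pvPre (ps : List String) (j : Nat) : Int := ((ps.map PySem.Str.len).take j).sum

-- the common target: the association list [(1, pre 0), (2, pre 1), …, (n, pre (n-1))]
def pvTable (ps : List String) : List (Int × Int) :=
  (List.range ps.length).map (fun (j : Nat) => ((j : Int) + 1, pvPre ps j))

theorem pvPre_zero (ps : List String) : pvPre ps 0 = 0 := rfl

theorem pvPre_cons_succ (p : String) (ps : List String) (j : Nat) :
    pvPre (p :: ps) (j + 1) = PySem.Str.len p + pvPre ps j := by
  simp [pvPre, List.take_succ_cons]

theorem pvPre_succ (ps : List String) (j : Nat) (h : j < ps.length) :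
    pvPre ps (j + 1) = pvPre ps j + PySem.Str.len ps[j] := by
  simp [pvPre, List.take_add_one, List.getElem?_eq_getElem (by simpa using h)]

-- A's fold, from a dict whose keys are all < i, appends exactly the shifted table
theorem pv_foldA_items (ps : List String) (d : PySem.Dict Int Int) (i len : Int)
    (h : ∀ k ∈ d.keys, k < i) :
    (ps.foldl
      (fun (st : PySem.Dict Int Int × Int × Int) item =>
        let (d, i, length) := st
        (d.insert i length, i + 1, length + PySem.Str.len item))
      (d, i, len)).1.items
    = d.items ++ (List.range ps.length).map (fun (j : Nat) => (i + (j : Int), len + pvPre ps j)) := by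
  induction ps generalizing d i len with
  | nil => simp
  | cons p ps ih =>
    have hfresh : d.contains i = false := by
      cases hcb : d.contains i
      · rfl
      · exact absurd (h i ((PySem.Dict.contains_iff_mem_keys d i).mp hcb)) (lt_irrefl i)
    have h' : ∀ k ∈ (d.insert i len).keys, k < i + 1 := by
      intro k hk
      rcases (PySem.Dict.mem_keys_insert (d := d) (k := i) (v := len) (k' := k)).mp hk with rfl | hk'
      · omega
      · have := h k hk'; omega
    simp only [List.foldl_cons]
    rw [ih (d.insert i len) (i + 1) (len + PySem.Str.len p) h']
    rw [PySem.Dict.items_insert_of_not_contains d len hfresh]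
    simp only [List.length_cons, List.range_succ_eq_map, List.map_cons, List.map_map,
      List.append_assoc, List.cons_append, List.nil_append]
    congr 2
    · simp [pvPre_zero]
    · apply List.map_congr_left
      intro j _
      simp only [Function.comp_apply, pvPre_cons_succ, Prod.mk.injEq, Nat.succ_eq_add_one]
      constructor <;> push_cast <;> ring

-- the sum-of-lengths fold is pvPre at the full length
theorem pv_total (ps : List String) (c : Int) :
    ps.foldl (fun a p => a + PySem.Str.len p) c = c + pvPre ps ps.length := by
  induction ps generalizing c with
  | nil => simp [pvPre]
  | cons p ps ih =>
    simp only [List.foldl_cons, List.length_cons, pvPre_cons_succ]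
    rw [ih]; ring

-- B's countdown loop, started at pvPre k, appends the reversed table prefix
theorem pv_foldB (ps : List String) (k : Nat) (hk : k ≤ ps.length)
    (acc : List (Int × Int)) :
    ((PySem.List.pyRange (k : Int) 0 (-1)).foldl
      (fun (st : List (Int × Int) × Int) i =>
        let pos := st.2 - PySem.Str.len ((PySem.List.pyGet? ps (i - 1)).getD "")
        (st.1 ++ [(i, pos)], pos))
      (acc, pvPre ps k)).1
    = acc ++ ((List.range k).map (fun (j : Nat) => ((j : Int) + 1, pvPre ps j))).reverse := by
  induction k generalizing acc with
  | zero => simp [PySem.List.pyRange_neg_one_eq_nil (le_refl (0 : Int))]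
  | succ k ih =>
    have hlt : (0 : Int) < ((k + 1 : Nat) : Int) := by positivity
    rw [PySem.List.pyRange_neg_one_cons hlt]
    have hkl : k < ps.length := by omega
    have hget : PySem.List.pyGet? ps (((k + 1 : Nat) : Int) - 1) = some ps[k] := by
      have : (((k + 1 : Nat) : Int) - 1) = ((k : Nat) : Int) := by push_cast; ring
      rw [this, PySem.List.pyGet?_natCast, List.getElem?_eq_getElem hkl]
    simp only [List.foldl_cons, hget, Option.getD_some]
    have hpos : pvPre ps (k + 1) - PySem.Str.len ps[k] = pvPre ps k := by
      rw [pvPre_succ ps k hkl]; ring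
    have hrange : (((k + 1 : Nat) : Int) - 1) = ((k : Nat) : Int) := by push_cast; ring
    rw [hpos, hrange, ih (by omega) (acc ++ [(((k + 1 : Nat) : Int), pvPre ps k)])]
    rw [List.range_succ, List.map_append, List.reverse_append]
    simp only [List.map_cons, List.map_nil, List.reverse_cons, List.reverse_nil,
      List.nil_append, List.append_assoc, List.cons_append]
    congr 3

-- the table's keys 1..n are pairwise distinct
theorem pv_table_keys_nodup (ps : List String) :
    ((pvTable ps).map Prod.fst).Nodup := by
  unfold pvTable
  rw [List.map_map]
  exact List.nodup_range.map (fun a b hab => by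
    simp only [Function.comp_apply] at hab; omega)

-- inserting the table's pairs into the empty dict yields exactly the table
theorem pv_fold_insert_table (ps : List String) :
    ((pvTable ps).foldl (fun (d : PySem.Dict Int Int) p => d.insert p.1 p.2)
      PySem.Dict.empty).items = pvTable ps := by
  have := PySem.Dict.items_foldl_insert_fresh (l := pvTable ps)
    (k := Prod.fst) (v := Prod.snd) (d := (PySem.Dict.empty : PySem.Dict Int Int))
    (by intro a _; simp) (pv_table_keys_nodup ps)
  simpa using this

-- A's result is the table
theorem pv_A_eq (ps : List String) : get_starts_of_paragraphs ps = pvTable ps := by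
  unfold get_starts_of_paragraphs
  rw [pv_foldA_items ps PySem.Dict.empty 1 0 (by simp)]
  have hA : (PySem.Dict.empty : PySem.Dict Int Int).items = [] := rfl
  rw [hA, List.nil_append]
  unfold pvTable
  apply List.map_congr_left
  intro j _
  simp [add_comm]

-- B's result is the table
theorem pv_B_eq (ps : List String) : get_starts_of_paragraphs_alt ps = pvTable ps := by
  unfold get_starts_of_paragraphs_alt
  simp only [pv_total ps 0, zero_add]
  rw [pv_foldB ps ps.length (le_refl _) []]
  simp only [List.nil_append, List.reverse_reverse]
  exact pv_fold_insert_table ps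

-- ===== VERDICT =====
theorem get_starts_of_paragraphs_spec : Claim_equal_get_starts_of_paragraphs := by
  intro paragraphs _
  show _ = _
  rw [pv_A_eq, pv_B_eq]
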